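-- pv_equiv track=rewrite | github.com/Simenb123/Utvalg | src/audit_actions/series_control/views.py | _map_regnskapslinje_labels
-- ===== SOURCE A (Python) =====
-- from typing import Any, Iterable, Sequence
--
-- def _unique_nonempty(values: Iterable[object]) -> list[str]:
--     out: list[str] = []
--     seen: set[str] = set()
--     for value in values:
--         text = str(value or "").strip()
--         if not text or text in seen:
--             continue
--         out.append(text)
--         seen.add(text)
--     return out
--
-- def _compact_join(values: Iterable[object], *, limit: int = 4) -> str:
--     uniq = _unique_nonempty(values)
--     if not uniq:
--         return ""
--     if len(uniq) <= limit:
--         return ", ".join(uniq)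
--     remaining = len(uniq) - limit
--     return ", ".join(uniq[:limit]) + f" (+{remaining})"
--
-- def _map_regnskapslinje_labels(values: Iterable[object], konto_regnskapslinje_map: dict[str, str] | None) -> str:
--     if not konto_regnskapslinje_map:
--         return ""
--     labels = []
--     for value in values:
--         konto = str(value or "").strip()
--         if not konto:
--             continue
--         label = str(konto_regnskapslinje_map.get(konto, "") or "").strip()
--         if label:
--             labels.append(label)
--     return _compact_join(labels)
-- ===== SOURCE B (Python) =====
-- def _map_regnskapslinje_labels(values, konto_regnskapslinje_map):
--     if not konto_regnskapslinje_map: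
--         return ""
--     seen = set()
--     buf = []
--     total = 0
--     for value in values:
--         konto = str(value or "").strip()
--         if not konto:
--             continue
--         label = str(konto_regnskapslinje_map.get(konto, "") or "").strip()
--         if not label or label in seen:
--             continue
--         seen.add(label)
--         total += 1
--         if total <= 4:
--             buf.append(label)
--     if total == 0:
--         return ""
--     result = ", ".join(buf)
--     if total > 4:
--         result += f" (+{total - 4})"
--     return result
-- ===== Notes on version B (the rewrite author's own statement) =====
-- stated objective: alternative
-- what changed: A's three-stage pipeline (collect all labels into a list, dedupe it into a second list, then compact-join that list) is replaced by a single pass over values that keeps only a seen-set, the first 4 distinct labels and a running count, formatting the result directly from that state.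
import Mathlib
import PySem

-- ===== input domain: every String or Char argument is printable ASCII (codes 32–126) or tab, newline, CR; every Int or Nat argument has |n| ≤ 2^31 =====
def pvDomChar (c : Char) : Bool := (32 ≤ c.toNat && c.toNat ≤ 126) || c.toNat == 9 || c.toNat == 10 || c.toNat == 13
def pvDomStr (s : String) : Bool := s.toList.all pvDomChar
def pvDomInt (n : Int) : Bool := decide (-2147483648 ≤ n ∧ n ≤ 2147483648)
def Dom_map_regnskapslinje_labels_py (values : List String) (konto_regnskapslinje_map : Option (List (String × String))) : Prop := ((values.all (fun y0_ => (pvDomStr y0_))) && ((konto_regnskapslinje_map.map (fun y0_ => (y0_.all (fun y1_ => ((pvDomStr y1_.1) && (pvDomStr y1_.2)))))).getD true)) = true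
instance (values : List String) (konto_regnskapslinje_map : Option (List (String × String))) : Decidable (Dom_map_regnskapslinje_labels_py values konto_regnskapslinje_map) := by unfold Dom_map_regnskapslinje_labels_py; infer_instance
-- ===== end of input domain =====

-- B fuses A's three passes (collect labels, dedupe, compact-join) into one pass keeping only a
-- seen-set, the first 4 distinct labels and a counter; objective: alternative (same O(n) cost).

-- ===== PORT A =====
-- _unique_nonempty
def pvUniqueNonempty (values : List String) : List String :=
  (values.foldl (fun (st : List String × PySem.Set String) value =>
      let text := PySem.Str.strip (if value == "" then "" else value)
      if text == "" || PySem.Set.contains st.2 text then st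
      else (st.1 ++ [text], PySem.Set.add st.2 text))
    ([], PySem.Set.empty)).1

-- _compact_join (limit = 4 at the call site)
def pvCompactJoin (values : List String) (limit : Int) : String :=
  let uniq := pvUniqueNonempty values
  if uniq = [] then ""
  else if (uniq.length : Int) ≤ limit then PySem.Str.join ", " uniq
  else PySem.Str.join ", " (PySem.List.slice uniq none (some limit))
       ++ " (+" ++ PySem.Int.toStr ((uniq.length : Int) - limit) ++ ")"

def map_regnskapslinje_labels_py (values : List String) (konto_regnskapslinje_map : Option (List (String × String))) : String :=
  match konto_regnskapslinje_map with
  | none => ""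
  | some m =>
    if m = [] then ""
    else
      let d := PySem.Dict.ofList m
      let labels := values.foldl (fun (labels : List String) value =>
          let konto := PySem.Str.strip (if value == "" then "" else value)
          if konto == "" then labels
          else
            let g := PySem.Dict.getD d konto ""
            let label := PySem.Str.strip (if g == "" then "" else g)
            if label == "" then labels else labels ++ [label]) []
      pvCompactJoin labels 4

-- ===== PORT B =====
def map_regnskapslinje_labels_py_alt (values : List String) (konto_regnskapslinje_map : Option (List (String × String))) : String :=
  match konto_regnskapslinje_map with
  | none => ""
  | some m =>
    if m = [] then ""
    else
      let d := PySem.Dict.ofList m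
      let st := values.foldl (fun (st : PySem.Set String × List String × Int) value =>
          let konto := PySem.Str.strip (if value == "" then "" else value)
          if konto == "" then st
          else
            let g := PySem.Dict.getD d konto ""
            let label := PySem.Str.strip (if g == "" then "" else g)
            if label == "" || PySem.Set.contains st.1 label then st
            else
              let total := st.2.2 + 1
              (PySem.Set.add st.1 label,
               if total ≤ 4 then st.2.1 ++ [label] else st.2.1,
               total))
        (PySem.Set.empty, [], 0)
      if st.2.2 = 0 then ""
      else
        let result := PySem.Str.join ", " st.2.1
        if 4 < st.2.2 then result ++ " (+" ++ PySem.Int.toStr (st.2.2 - 4) ++ ")"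
        else result

-- ===== PRECONDITION & SPEC =====
def Spec_map_regnskapslinje_labels_py (values : List String) (konto_regnskapslinje_map : Option (List (String × String))) (out : String) : Prop := out = map_regnskapslinje_labels_py_alt values konto_regnskapslinje_map
instance (values : List String) (konto_regnskapslinje_map : Option (List (String × String))) (out : String) : Decidable (Spec_map_regnskapslinje_labels_py values konto_regnskapslinje_map out) := by unfold Spec_map_regnskapslinje_labels_py; infer_instance

-- ===== CLAIM (what is proved, stated in full; the proofs are below) =====
def Claim_equal_map_regnskapslinje_labels_py : Prop := ∀ (values : List String) (konto_regnskapslinje_map : Option (List (String × String))), Dom_map_regnskapslinje_labels_py values konto_regnskapslinje_map → Spec_map_regnskapslinje_labels_py values konto_regnskapslinje_map (map_regnskapslinje_labels_py values konto_regnskapslinje_map)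

-- ===== LEMMAS AND PROOFS =====

-- strip is idempotent
theorem pv_dropWhile_idem (p : Char → Bool) (l : List Char) :
    (l.dropWhile p).dropWhile p = l.dropWhile p := by
  induction l with
  | nil => simp
  | cons a l ih =>
    by_cases h : p a = true
    · simpa [h] using ih
    · simp [h]

theorem pv_dropWhile_eq_self_of_prefix (p : Char → Bool) {u t : List Char}
    (h : u <+: t) (ht : t.dropWhile p = t) : u.dropWhile p = u := by
  cases u with
  | nil => simp
  | cons a u' =>
    obtain ⟨r, hr⟩ := h
    subst hr
    have hpa : p a = false := by
      cases hp : p a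
      · rfl
      · exfalso
        rw [List.cons_append, List.dropWhile_cons, if_pos hp] at ht
        have hle := List.length_dropWhile_le p (u' ++ r)
        rw [ht] at hle
        simp at hle
    simp [hpa]

theorem pv_rstrip_prefix (l : List Char) : PySem.Chars.rstrip l <+: l := by
  unfold PySem.Chars.rstrip
  obtain ⟨r, hr⟩ := List.dropWhile_suffix (l := l.reverse) PySem.Chars.isspace
  exact ⟨r.reverse, by rw [← List.reverse_append, hr, List.reverse_reverse]⟩

theorem pv_chars_strip_idem (l : List Char) :
    PySem.Chars.strip (PySem.Chars.strip l) = PySem.Chars.strip l := by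
  unfold PySem.Chars.strip PySem.Chars.lstrip
  have h1 : (l.dropWhile PySem.Chars.isspace).dropWhile PySem.Chars.isspace
      = l.dropWhile PySem.Chars.isspace := pv_dropWhile_idem _ _
  have h2 : (PySem.Chars.rstrip (l.dropWhile PySem.Chars.isspace)).dropWhile PySem.Chars.isspace
      = PySem.Chars.rstrip (l.dropWhile PySem.Chars.isspace) :=
    pv_dropWhile_eq_self_of_prefix _ (pv_rstrip_prefix _) h1
  rw [h2]
  unfold PySem.Chars.rstrip
  rw [List.reverse_reverse, pv_dropWhile_idem]

theorem pv_strip_idem (s : String) :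
    PySem.Str.strip (PySem.Str.strip s) = PySem.Str.strip s := by
  apply String.toList_inj.mp
  rw [PySem.Str.toList_strip, PySem.Str.toList_strip]
  exact pv_chars_strip_idem _

-- the label (as a 0- or 1-element list) that both loops derive from one input value
def pvLab (d : PySem.Dict String String) (value : String) : List String :=
  let konto := PySem.Str.strip (if value == "" then "" else value)
  if konto == "" then []
  else
    let g := PySem.Dict.getD d konto ""
    let label := PySem.Str.strip (if g == "" then "" else g)
    if label == "" then [] else [label]

theorem pv_mem_lab {d : PySem.Dict String String} {v l : String}
    (h : l ∈ pvLab d v) : PySem.Str.strip l = l ∧ l ≠ "" := by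
  simp only [pvLab] at h
  split_ifs at h <;> simp at h <;>
    (subst h
     refine ⟨pv_strip_idem _, fun hc => ?_⟩
     simp_all)

-- A's first loop builds the concatenation of pvLab over values
theorem pv_labels_eq (d : PySem.Dict String String) (values : List String) (acc : List String) :
    values.foldl (fun (labels : List String) value =>
        let konto := PySem.Str.strip (if value == "" then "" else value)
        if konto == "" then labels
        else
          let g := PySem.Dict.getD d konto ""
          let label := PySem.Str.strip (if g == "" then "" else g)
          if label == "" then labels else labels ++ [label]) acc
      = acc ++ values.flatMap (pvLab d) := by
  have hfun : (fun (labels : List String) value =>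
        let konto := PySem.Str.strip (if value == "" then "" else value)
        if konto == "" then labels
        else
          let g := PySem.Dict.getD d konto ""
          let label := PySem.Str.strip (if g == "" then "" else g)
          if label == "" then labels else labels ++ [label])
      = (fun (labels : List String) value => labels ++ pvLab d value) := by
    funext labels value
    simp only [pvLab]
    split_ifs <;> simp
  rw [hfun, PySem.List.foldl_append_eq_flatMap]

-- A's dedupe step specialised to already-stripped nonempty labels
def pvUStep' (st : List String × PySem.Set String) (l : String) : List String × PySem.Set String :=
  if PySem.Set.contains st.2 l then st else (st.1 ++ [l], PySem.Set.add st.2 l)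

theorem pv_uniq_fold (L : List String) (hL : ∀ l ∈ L, PySem.Str.strip l = l ∧ l ≠ "") :
    ∀ st : List String × PySem.Set String,
    L.foldl (fun (st : List String × PySem.Set String) value =>
      let text := PySem.Str.strip (if value == "" then "" else value)
      if text == "" || PySem.Set.contains st.2 text then st
      else (st.1 ++ [text], PySem.Set.add st.2 text)) st
    = L.foldl pvUStep' st := by
  intro st
  apply PySem.List.foldl_congr_mem
  intro acc a ha
  obtain ⟨hs, hne⟩ := hL a ha
  have hbeq : (a == "") = false := by simpa using hne
  simp only [hbeq, Bool.false_eq_true, if_false]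
  rw [hs]
  simp [pvUStep', hbeq]

-- B's per-label step
def pvStep2 (st : PySem.Set String × List String × Int) (l : String) :
    PySem.Set String × List String × Int :=
  if PySem.Set.contains st.1 l then st
  else
    (PySem.Set.add st.1 l,
     if st.2.2 + 1 ≤ 4 then st.2.1 ++ [l] else st.2.1,
     st.2.2 + 1)

-- B's loop over values is the pvStep2 fold over the flattened labels
theorem pv_b_fold (d : PySem.Dict String String) (values : List String) :
    ∀ st : PySem.Set String × List String × Int,
    values.foldl (fun (st : PySem.Set String × List String × Int) value =>
        let konto := PySem.Str.strip (if value == "" then "" else value)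
        if konto == "" then st
        else
          let g := PySem.Dict.getD d konto ""
          let label := PySem.Str.strip (if g == "" then "" else g)
          if label == "" || PySem.Set.contains st.1 label then st
          else
            let total := st.2.2 + 1
            (PySem.Set.add st.1 label,
             if total ≤ 4 then st.2.1 ++ [label] else st.2.1,
             total)) st
    = (values.flatMap (pvLab d)).foldl pvStep2 st := by
  intro st
  rw [List.foldl_flatMap]
  apply PySem.List.foldl_congr_mem
  intro acc v _
  beta_reduce
  simp only [pvLab, beq_iff_eq]
  by_cases h1 : PySem.Str.strip (if v = "" then "" else v) = ""
  · simp [h1]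
  · by_cases h2 : PySem.Str.strip
        (if PySem.Dict.getD d (PySem.Str.strip (if v = "" then "" else v)) "" = "" then ""
         else PySem.Dict.getD d (PySem.Str.strip (if v = "" then "" else v)) "") = ""
    · simp [h1, h2]
    · simp [h1, h2, pvStep2]

-- the fused invariant: B's state is (seen, first 4 of A's uniq, length of A's uniq)
theorem pv_inv (L : List String) :
    ∀ (out : List String) (seen : PySem.Set String),
    L.foldl pvStep2 (seen, out.take 4, (out.length : Int))
    = ((L.foldl pvUStep' (out, seen)).2,
       (L.foldl pvUStep' (out, seen)).1.take 4,
       ((L.foldl pvUStep' (out, seen)).1.length : Int)) := by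
  induction L with
  | nil => intro out seen; rfl
  | cons l L ih =>
    intro out seen
    simp only [List.foldl_cons, pvStep2, pvUStep']
    split_ifs with h hle
    · exact ih out seen
    · have htake : List.take 4 (out ++ [l]) = List.take 4 out ++ [l] := by
        rw [List.take_append]
        have hlen : out.length ≤ 3 := by omega
        congr 1
        exact List.take_of_length_le (by simp; omega)
      have h' := ih (out ++ [l]) (PySem.Set.add seen l)
      rw [htake] at h'
      simpa using h'
    · have htake : List.take 4 (out ++ [l]) = List.take 4 out := by
        rw [List.take_append]
        have hlen : 4 ≤ out.length := by omega
        simp [Nat.sub_eq_zero_of_le hlen]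
      have h' := ih (out ++ [l]) (PySem.Set.add seen l)
      rw [htake] at h'
      simpa using h'

-- ===== VERDICT (by name: the statement is the Claim_ definition above) =====
theorem map_regnskapslinje_labels_py_spec : Claim_equal_map_regnskapslinje_labels_py := by
  intro values kmap _
  unfold Spec_map_regnskapslinje_labels_py
  unfold map_regnskapslinje_labels_py map_regnskapslinje_labels_py_alt
  cases kmap with
  | none => rfl
  | some m =>
    by_cases hm : m = []
    · simp [hm]
    · simp only [if_neg hm]
      rw [pv_b_fold (PySem.Dict.ofList m) values (PySem.Set.empty, [], 0)]
      simp only [pvUniqueNonempty, pvCompactJoin]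
      rw [pv_labels_eq (PySem.Dict.ofList m) values []]
      simp only [List.nil_append]
      have hmem : ∀ l ∈ values.flatMap (pvLab (PySem.Dict.ofList m)),
          PySem.Str.strip l = l ∧ l ≠ "" := by
        intro l hl
        obtain ⟨v, -, hv⟩ := List.mem_flatMap.mp hl
        exact pv_mem_lab hv
      rw [pv_uniq_fold (values.flatMap (pvLab (PySem.Dict.ofList m))) hmem ([], PySem.Set.empty)]
      have hinv : (values.flatMap (pvLab (PySem.Dict.ofList m))).foldl pvStep2
            (PySem.Set.empty, [], 0)
          = (((values.flatMap (pvLab (PySem.Dict.ofList m))).foldl pvUStep'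
                ([], PySem.Set.empty)).2,
             ((values.flatMap (pvLab (PySem.Dict.ofList m))).foldl pvUStep'
                ([], PySem.Set.empty)).1.take 4,
             (((values.flatMap (pvLab (PySem.Dict.ofList m))).foldl pvUStep'
                ([], PySem.Set.empty)).1.length : Int)) := by
        simpa using pv_inv (values.flatMap (pvLab (PySem.Dict.ofList m))) [] PySem.Set.empty
      rw [hinv]
      generalize (values.flatMap (pvLab (PySem.Dict.ofList m))).foldl pvUStep'
        ([], PySem.Set.empty) = F
      obtain ⟨U, sn⟩ := F
      simp only []
      by_cases hU : U = []
      · subst hU; simp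
      · have hpos : 0 < U.length := List.length_pos_iff.mpr hU
        rw [if_neg hU, if_neg (show ¬ ((U.length : Int) = 0) by omega)]
        by_cases h4 : (U.length : Int) ≤ 4
        · rw [if_pos h4, if_neg (show ¬ ((4 : Int) < (U.length : Int)) by omega)]
          rw [List.take_of_length_le (show U.length ≤ 4 by omega)]
        · rw [if_neg h4, if_pos (show (4 : Int) < (U.length : Int) by omega)]
          rw [PySem.List.slice_to U (by omega : (0 : Int) ≤ 4)]
          rfl
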